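-- pv_equiv track=rewrite | github.com/nirdizati-research/predict-python | log_util/log_metrics.py | new_trace_start
-- ===== SOURCE A (Python) =====
-- from collections import defaultdict, OrderedDict
--
-- TIMESTAMP_CLASSIFIER = "time:timestamp"
--
-- def new_trace_start(logs):
--     """Creates dict of new traces by date
--
--     :return {'2010-12-30': 1, '2011-01-06': 2}
--     :rtype: OrderedDict
--     """
--     executions = defaultdict(lambda: 0)
--     for log in logs:
--         for trace in log:
--             timestamp = trace[0][TIMESTAMP_CLASSIFIER]
--             date = timestamp.split("T")[0]
--             executions[date] += 1
--     return OrderedDict(sorted(executions.items()))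
-- ===== SOURCE B (Python) =====
-- from collections import OrderedDict
-- from itertools import groupby
--
-- TIMESTAMP_CLASSIFIER = "time:timestamp"
--
-- def new_trace_start(logs):
--     dates = []
--     for log in logs:
--         for trace in log:
--             dates.append(trace[0][TIMESTAMP_CLASSIFIER].split("T")[0])
--     dates.sort()
--     return OrderedDict((d, sum(1 for _ in g)) for d, g in groupby(dates))
-- ===== Notes on version B (the rewrite author's own statement) =====
-- stated objective: alternative
-- what changed: Instead of maintaining a running defaultdict counter and sorting its items at the end, B collects all start-date strings into a flat list, sorts that list, and produces (date, count) pairs by grouping consecutive equal dates with itertools.groupby.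
import Mathlib
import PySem

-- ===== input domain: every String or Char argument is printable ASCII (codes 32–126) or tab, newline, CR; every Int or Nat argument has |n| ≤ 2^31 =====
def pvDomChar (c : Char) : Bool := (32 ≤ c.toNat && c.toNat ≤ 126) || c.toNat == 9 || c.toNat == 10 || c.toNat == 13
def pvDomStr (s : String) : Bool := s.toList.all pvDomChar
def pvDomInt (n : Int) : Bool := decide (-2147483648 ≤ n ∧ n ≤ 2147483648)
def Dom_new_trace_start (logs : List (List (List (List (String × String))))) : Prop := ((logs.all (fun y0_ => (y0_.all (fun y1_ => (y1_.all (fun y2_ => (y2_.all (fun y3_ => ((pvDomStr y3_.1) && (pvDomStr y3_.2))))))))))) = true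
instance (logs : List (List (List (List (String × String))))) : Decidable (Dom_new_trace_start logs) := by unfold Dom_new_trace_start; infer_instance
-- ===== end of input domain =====

-- B replaces A's running defaultdict counter by a flat list of dates, sorted and
-- then grouped (consecutive equal dates) into (date, count) pairs; same cost, no
-- running dict. The equivalence is about the return value (neither mutates input).

-- shared helper (used by both ports): trace[0][TIMESTAMP_CLASSIFIER].split("T")[0].
-- Under Pre_ the trace is nonempty and the key is present, so pyGetD/getD are exact;
-- split("T") of any string is nonempty, so the final [0] is exact as well.
def pvDate (trace : List (List (String × String))) : String :=
  let timestamp := (PySem.Dict.mk (PySem.List.pyGetD trace 0 [])).getD "time:timestamp" ""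
  ((PySem.Str.split? timestamp "T").getD []).getD 0 ""

-- ===== PORT A =====
def new_trace_start (logs : List (List (List (List (String × String))))) : List (String × Int) :=
  let executions :=
    logs.foldl (fun executions log =>
      log.foldl (fun executions trace =>
        PySem.Dict.modify executions (pvDate trace) 0 (· + 1)) executions) PySem.Dict.empty
  PySem.List.sorted2 executions.items (fun p => p.1) (fun p => p.2) false

-- ===== PORT B =====
-- itertools.groupby over a sorted list: consecutive equal dates form one group
def groupCounts : List String → List (String × Int)
  | [] => []
  | d :: rest =>
      (d, 1 + ((rest.takeWhile (· == d)).length : Int)) ::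
        groupCounts (rest.dropWhile (· == d))
termination_by ss => ss.length
decreasing_by
  simp only [List.length_cons]
  exact Nat.lt_succ_of_le (List.length_dropWhile_le _ _)

def new_trace_start_alt (logs : List (List (List (List (String × String))))) : List (String × Int) :=
  let dates :=
    logs.foldl (fun dates log =>
      log.foldl (fun dates trace => dates ++ [pvDate trace]) dates) []
  groupCounts (PySem.List.sorted dates (fun x => x) false)

-- ===== PRECONDITION & SPEC =====
-- Pre_: A raises IndexError on an empty trace and KeyError when the first event
-- lacks the "time:timestamp" key; exactly those inputs are excluded.
def Pre_new_trace_start (logs : List (List (List (List (String × String))))) : Prop :=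
  (logs.all (fun log => log.all (fun trace =>
    !trace.isEmpty && (trace.headD []).any (fun p => p.1 == "time:timestamp")))) = true
instance (logs : List (List (List (List (String × String))))) : Decidable (Pre_new_trace_start logs) := by unfold Pre_new_trace_start; infer_instance

def pvWitness_new_trace_start : (List (List (List (List (String × String))))) :=
  [[[[("time:timestamp", "2010-12-30T10:15:00")], [("time:timestamp", "2011-01-06T08:00:00")]],
    [[("time:timestamp", "2011-01-06T09:00:00")]]]]

def Spec_new_trace_start (logs : List (List (List (List (String × String))))) (out : List (String × Int)) : Prop := out = new_trace_start_alt logs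
instance (logs : List (List (List (List (String × String))))) (out : List (String × Int)) : Decidable (Spec_new_trace_start logs out) := by unfold Spec_new_trace_start; infer_instance

-- ===== CLAIM (what is proved, stated in full; the proofs are below) =====
def Claim_equal_new_trace_start : Prop := ∀ (logs : List (List (List (List (String × String))))), Dom_new_trace_start logs → Pre_new_trace_start logs → Spec_new_trace_start logs (new_trace_start logs)

-- ===== LEMMAS AND PROOFS =====

lemma insertBy_congr {α : Type} (b b' : α → α → Bool) (x : α) :
    ∀ ys : List α, (∀ y ∈ ys, b x y = b' x y) →
      PySem.List.insertBy b x ys = PySem.List.insertBy b' x ys := by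
  intro ys
  induction ys with
  | nil => intro _; rfl
  | cons y ys ih =>
      intro h
      simp only [PySem.List.insertBy]
      rw [h y (by simp)]
      by_cases hb : b' x y = true
      · simp [hb]
      · simp only [hb, if_neg Bool.false_ne_true, ih (fun z hz => h z (by simp [hz]))]

lemma foldl_insertBy_congr {α : Type} (b b' : α → α → Bool) (S : List α)
    (hag : ∀ x ∈ S, ∀ y ∈ S, b x y = b' x y) :
    ∀ (xs acc : List α), (∀ x ∈ xs, x ∈ S) → (∀ y ∈ acc, y ∈ S) →
      xs.foldl (fun a x => PySem.List.insertBy b x a) acc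
        = xs.foldl (fun a x => PySem.List.insertBy b' x a) acc := by
  intro xs
  induction xs with
  | nil => intros; rfl
  | cons x xs ih =>
      intro acc hxs hacc
      simp only [List.foldl_cons]
      rw [insertBy_congr b b' x acc (fun y hy => hag x (hxs x (by simp)) y (hacc y hy))]
      exact ih _ (fun z hz => hxs z (by simp [hz]))
        (fun y hy => by
          rcases (PySem.List.mem_insertBy b' x y acc).1 hy with h | h
          · exact h ▸ hxs x (by simp)
          · exact hacc y h)

-- with pairwise-distinct first components, Python's no-key sort of pairs is the sort by first component
lemma sorted2_fst (xs : List (String × Int))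
    (hinj : ∀ a ∈ xs, ∀ b ∈ xs, a.1 = b.1 → a = b) :
    PySem.List.sorted2 xs (fun p => p.1) (fun p => p.2) false
      = PySem.List.sorted xs (fun p => p.1) false := by
  simp only [PySem.List.sorted2, PySem.List.sorted, if_neg Bool.false_ne_true]
  refine foldl_insertBy_congr _ _ xs ?_ xs [] (fun x hx => hx) (by simp)
  intro a ha c hc
  rcases lt_trichotomy a.1 c.1 with h | h | h
  · simp [h]
  · have hac : a = c := hinj a ha c hc h
    subst hac; simp
  · simp [h, lt_asymm h]

lemma dropWhile_gt (d : String) :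
    ∀ rest : List String, (d :: rest).Pairwise (· ≤ ·) →
      ∀ y ∈ rest.dropWhile (· == d), d < y := by
  intro rest
  induction rest with
  | nil => simp [List.dropWhile]
  | cons r rs ih =>
      intro hp y
      rcases List.pairwise_cons.1 hp with ⟨hd, hrs⟩
      by_cases hr : (r == d) = true
      · have hp' : (d :: rs).Pairwise (· ≤ ·) :=
          List.pairwise_cons.2 ⟨fun z hz => hd z (by simp [hz]), (List.pairwise_cons.1 hrs).2⟩
        simpa [List.dropWhile, hr] using ih hp' y
      · simp only [List.dropWhile, hr]
        intro hy
        have hdr : d < r := lt_of_le_of_ne (hd r (by simp)) (fun he => hr (by simp [he.symm]))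
        rcases List.mem_cons.1 hy with h | h
        · exact h ▸ hdr
        · exact lt_of_lt_of_le hdr ((List.pairwise_cons.1 hrs).1 y h)

lemma count_takeWhile (d : String) (rest : List String) :
    (rest.takeWhile (· == d)).count d = (rest.takeWhile (· == d)).length := by
  rw [List.count_eq_length]
  intro b hb
  exact (eq_of_beq (List.mem_takeWhile_imp (p := fun x => x == d) hb)).symm

lemma count_ne_takeWhile (d k : String) (hk : k ≠ d) (rest : List String) :
    (rest.takeWhile (· == d)).count k = 0 := by
  rw [List.count_eq_zero]
  intro hmem
  exact hk (by simpa using List.mem_takeWhile_imp hmem)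

lemma groupCounts_cons (d : String) (rest : List String) :
    groupCounts (d :: rest)
      = (d, 1 + (((rest.takeWhile (· == d)).length : Nat) : Int))
          :: groupCounts (rest.dropWhile (· == d)) := by
  rw [groupCounts]

lemma gc_main : ∀ (n : Nat) (ss : List String), ss.length ≤ n → ss.Pairwise (· ≤ ·) →
    (∀ p ∈ groupCounts ss, p.1 ∈ ss ∧ p.2 = (ss.count p.1 : Int)) ∧
    (∀ k ∈ ss, ∃ c, (k, c) ∈ groupCounts ss) ∧
    (groupCounts ss).Pairwise (fun a b => a.1 < b.1) := by
  intro n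
  induction n with
  | zero =>
      intro ss hlen _
      have : ss = [] := List.length_eq_zero_iff.1 (Nat.le_zero.1 hlen)
      subst this
      simp [groupCounts]
  | succ n ih =>
      intro ss hlen hp
      cases ss with
      | nil => simp [groupCounts]
      | cons d rest =>
          set tw := rest.takeWhile (· == d) with htw
          set dw := rest.dropWhile (· == d) with hdw
          have hsplit : tw ++ dw = rest := List.takeWhile_append_dropWhile
          have hdwlen : dw.length ≤ n := by
            have h1 : dw.length ≤ rest.length := List.length_dropWhile_le _ _
            have h2 : rest.length ≤ n := by simpa using Nat.succ_le_succ_iff.1 hlen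
            omega
          have hdwsub : dw.Sublist rest := List.dropWhile_sublist _
          have hdwp : dw.Pairwise (· ≤ ·) :=
            ((List.pairwise_cons.1 hp).2).sublist hdwsub
          have hgt : ∀ y ∈ dw, d < y := dropWhile_gt d rest hp
          obtain ⟨ih1, ih2, ih3⟩ := ih dw hdwlen hdwp
          have hgceq : groupCounts (d :: rest) = (d, 1 + (tw.length : Int)) :: groupCounts dw := by
            rw [groupCounts_cons, ← htw, ← hdw]
          have hdw0 : dw.count d = 0 := by
            rw [List.count_eq_zero]
            intro hmem
            exact absurd rfl (ne_of_gt (hgt d hmem))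
          have htwc : tw.count d = tw.length := by rw [htw]; exact count_takeWhile d rest
          have h0 : rest.count d = tw.count d + dw.count d := by
            rw [← hsplit, List.count_append]
          have hcount_d : (d :: rest).count d = 1 + tw.length := by
            rw [List.count_cons_self, h0, htwc, hdw0]
            omega
          have hcount_tail : ∀ k, k ∈ dw → (d :: rest).count k = dw.count k := by
            intro k hk
            have hkd : k ≠ d := ne_of_gt (hgt k hk)
            have ha : (d :: rest).count k = rest.count k :=
              List.count_cons_of_ne (Ne.symm hkd)
            have hb : rest.count k = tw.count k + dw.count k := by
              rw [← hsplit, List.count_append]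
            rw [ha, hb, htw, count_ne_takeWhile d k hkd rest]
            omega
          refine ⟨?_, ?_, ?_⟩
          · intro p hp'
            rw [hgceq] at hp'
            rcases List.mem_cons.1 hp' with h | h
            · subst h
              refine ⟨by simp, ?_⟩
              simp only [hcount_d]
              push_cast
              ring
            · obtain ⟨hmem, hcnt⟩ := ih1 p h
              refine ⟨?_, ?_⟩
              · exact List.mem_cons_of_mem d (hdwsub.mem hmem)
              · rw [hcnt, hcount_tail p.1 hmem]
          · intro k hk
            rcases List.mem_cons.1 hk with h | h
            · exact ⟨1 + (tw.length : Int), by rw [hgceq, h]; exact List.mem_cons_self⟩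
            · rw [← hsplit] at h
              rcases List.mem_append.1 h with h | h
              · have : k = d := by simpa using List.mem_takeWhile_imp h
                exact ⟨1 + (tw.length : Int), by rw [hgceq, this]; exact List.mem_cons_self⟩
              · obtain ⟨c, hc⟩ := ih2 k h
                exact ⟨c, by rw [hgceq]; exact List.mem_cons_of_mem _ hc⟩
          · rw [hgceq]
            refine List.pairwise_cons.2 ⟨?_, ih3⟩
            intro q hq
            exact hgt q.1 (ih1 q hq).1

theorem new_trace_start_spec : Claim_equal_new_trace_start := by
  intro logs _ _
  unfold Spec_new_trace_start
  unfold new_trace_start new_trace_start_alt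
  have hds : logs.foldl (fun dates log =>
      log.foldl (fun dates trace => dates ++ [pvDate trace]) dates) []
      = logs.flatMap (fun log => log.map pvDate) := by
    simp only [PySem.List.foldl_append_singleton_eq_map, PySem.List.foldl_append_eq_flatMap,
      List.nil_append]
  set ds := logs.flatMap (fun log => log.map pvDate) with hdsdef
  have hdict : logs.foldl (fun executions log =>
      log.foldl (fun executions trace =>
        PySem.Dict.modify executions (pvDate trace) 0 (· + 1)) executions) PySem.Dict.empty
      = PySem.Dict.counter ds := by
    rw [PySem.Dict.counter_eq_foldl, hdsdef, List.foldl_flatMap]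
    simp only [List.foldl_map]
  rw [hds, hdict]
  -- the items of the counter have pairwise-distinct keys
  have hitems : (PySem.Dict.counter ds).items
      = (PySem.Set.ofList ds).map (fun k => (k, (ds.count k : Int))) :=
    PySem.Dict.items_counter ds
  have hinj : ∀ a ∈ (PySem.Dict.counter ds).items, ∀ b ∈ (PySem.Dict.counter ds).items,
      a.1 = b.1 → a = b := by
    intro a ha b hb hab
    rw [hitems] at ha hb
    obtain ⟨ka, hka, rfl⟩ := List.mem_map.1 ha
    obtain ⟨kb, hkb, rfl⟩ := List.mem_map.1 hb
    simp only at hab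
    subst hab; rfl
  rw [sorted2_fst _ hinj]
  -- facts about the sorted flat date list
  set ss := PySem.List.sorted ds (fun x => x) false with hssdef
  have hssperm : ss.Perm ds := PySem.List.sorted_perm ds (fun x => x) false
  have hsspair : ss.Pairwise (· ≤ ·) := PySem.List.sorted_pairwise ds (fun x => x)
  obtain ⟨h1, h2, h3⟩ := gc_main ss.length ss le_rfl hsspair
  apply PySem.List.sorted_eq_of_perm_of_pairwise_lt
  · -- groupCounts ss is a permutation of the counter's items
    rw [hitems]
    refine (List.perm_ext_iff_of_nodup ?_ ?_).2 ?_
    · exact List.Pairwise.imp (fun hab he => absurd (congrArg Prod.fst he) (ne_of_lt hab)) h3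
    · exact (PySem.Set.nodup_ofList ds).map (fun a b h => congrArg Prod.fst h)
    · intro p
      constructor
      · intro hpG
        obtain ⟨hmem, hcnt⟩ := h1 p hpG
        refine List.mem_map.2 ⟨p.1, (PySem.Set.mem_ofList ds p.1).2 (hssperm.mem_iff.1 hmem), ?_⟩
        have : ss.count p.1 = ds.count p.1 := hssperm.count_eq p.1
        rw [← this, ← hcnt]
      · intro hpI
        obtain ⟨k, hk, rfl⟩ := List.mem_map.1 hpI
        have hkss : k ∈ ss := hssperm.mem_iff.2 ((PySem.Set.mem_ofList ds k).1 hk)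
        obtain ⟨c, hc⟩ := h2 k hkss
        have : c = (ss.count k : Int) := ((h1 (k, c) hc).2 : _)
        rw [hssperm.count_eq k] at this
        rwa [← this]
  · exact h3
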